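-- pv_equiv track=rewrite | github.com/iwatobu/algorithm_for_DNAsequencing_coursera | week3.py | editDistance_pt
-- ===== SOURCE A (Python) =====
-- def editDistance_pt(x, y):
--     # Create distance matrix , x=pattern, y=text
--     D = []
--     for i in range(len(x)+1):
--         D.append([0]*(len(y)+1))
--     # Initialize first column of matrix
--     # first row all 0 as we do not know when x apear in y.
--     for i in range(len(x)+1):
--         D[i][0] = i
--     # Fill in the rest of the matrix
--     for i in range(1, len(x)+1):
--         for j in range(1, len(y)+1):
--             distHor = D[i][j-1] + 1
--             distVer = D[i-1][j] + 1
--             if x[i-1] == y[j-1]: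
--                 distDiag = D[i-1][j-1]
--             else:
--                 distDiag = D[i-1][j-1] + 1
--             D[i][j] = min(distHor, distVer, distDiag)
--     # Edit distance is the minimum value in the final row
--     return min(D[-1])
-- ===== SOURCE B (Python) =====
-- def editDistance_pt(x, y):
--     # Top-down memoized recursion on the same recurrence: demand-driven from the
--     # answer cells d(len(x), j) instead of A's forward row-by-row table fill.
--     memo = {}
--     def d(i, j):
--         if (i, j) in memo:
--             return memo[(i, j)]
--         if i == 0:
--             v = 0
--         elif j == 0:
--             v = i
--         else:
--             v = min(d(i, j - 1) + 1,
--                     d(i - 1, j) + 1,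
--                     d(i - 1, j - 1) + (x[i - 1] != y[j - 1]))
--         memo[(i, j)] = v
--         return v
--     m = len(x)
--     return min(d(m, j) for j in range(len(y) + 1))
-- ===== Notes on version B (the rewrite author's own statement) =====
-- stated objective: alternative
-- what changed: B replaces A's iterative forward row-by-row matrix fill and final-row scan with demand-driven top-down memoized recursion on the same recurrence, evaluating d(len(x), j) for each j and caching cells in a dict.
import Mathlib
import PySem

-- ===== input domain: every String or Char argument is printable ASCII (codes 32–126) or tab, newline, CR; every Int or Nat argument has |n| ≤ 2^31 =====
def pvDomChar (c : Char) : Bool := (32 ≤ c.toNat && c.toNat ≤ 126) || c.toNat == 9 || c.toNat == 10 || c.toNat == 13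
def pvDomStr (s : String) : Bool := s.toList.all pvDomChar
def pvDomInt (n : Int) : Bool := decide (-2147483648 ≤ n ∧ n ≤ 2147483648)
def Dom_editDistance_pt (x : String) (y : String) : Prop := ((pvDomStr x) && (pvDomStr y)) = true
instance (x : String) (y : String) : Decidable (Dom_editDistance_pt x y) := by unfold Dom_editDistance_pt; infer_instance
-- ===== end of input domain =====

-- B replaces A's forward row-by-row table fill with demand-driven top-down memoized
-- recursion on the same recurrence (dict cache, answers d(len(x), j) computed on demand);
-- return value only.

-- ===== PORT A =====
-- Transliteration notes: range(k) with k = len+1 ≥ 0 is List.range k; range(1, len+1) is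
-- List.range' 1 len; every index A uses is in range on every input, so D[i][j] reads are
-- List.getD (exact here); min(D[-1]) is PySem.List.min? of PySem.List.pyGet? D (-1)
-- (both lists are nonempty on every input, so the .getD defaults are never reached).
def pvAInner (xl yl : List Char) (i : Nat) (D : List (List Int)) (j : Nat) : List (List Int) :=
  let distHor := (D.getD i []).getD (j - 1) 0 + 1
  let distVer := (D.getD (i - 1) []).getD j 0 + 1
  let distDiag :=
    if xl.getD (i - 1) ' ' = yl.getD (j - 1) ' ' then
      (D.getD (i - 1) []).getD (j - 1) 0
    else
      (D.getD (i - 1) []).getD (j - 1) 0 + 1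
  D.set i ((D.getD i []).set j (min distHor (min distVer distDiag)))

def pvAOuter (xl yl : List Char) (D : List (List Int)) (i : Nat) : List (List Int) :=
  (List.range' 1 yl.length).foldl (pvAInner xl yl i) D

def editDistance_pt (x : String) (y : String) : Int :=
  let xl := x.toList
  let yl := y.toList
  -- D = []; for i in range(len(x)+1): D.append([0]*(len(y)+1))
  let D0 : List (List Int) :=
    (List.range (xl.length + 1)).foldl
      (fun D _ => D ++ [List.replicate (yl.length + 1) (0 : Int)]) []
  -- for i in range(len(x)+1): D[i][0] = i
  let D1 : List (List Int) :=
    (List.range (xl.length + 1)).foldl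
      (fun D i => D.set i ((D.getD i []).set 0 (i : Int))) D0
  -- for i in range(1, len(x)+1): for j in range(1, len(y)+1): …
  let D2 : List (List Int) := (List.range' 1 xl.length).foldl (pvAOuter xl yl) D1
  -- return min(D[-1])
  ((PySem.List.min? ((PySem.List.pyGet? D2 (-1)).getD []) (fun v => v)).getD 0)

-- ===== PORT B =====
-- Transliteration of Source B: the recursive memoized d(i, j) with its dict cache threaded
-- through (Python's shared mutable `memo` becomes explicit state); recursion indices are
-- the nonnegative loop indices of the Python, so Nat; x[i-1], y[j-1] are in range whenever
-- read (i ≥ 1, j ≥ 1), so List.getD is exact.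
def pvBD (xl yl : List Char) (i j : Nat) (memo : PySem.Dict (Nat × Nat) Int) :
    Int × PySem.Dict (Nat × Nat) Int :=
  match memo.get? (i, j) with
  | some v => (v, memo)
  | none =>
    let p : Int × PySem.Dict (Nat × Nat) Int :=
      if _hi : i = 0 then ((0 : Int), memo)
      else if _hj : j = 0 then ((i : Int), memo)
      else
        let r1 := pvBD xl yl i (j - 1) memo
        let r2 := pvBD xl yl (i - 1) j r1.2
        let r3 := pvBD xl yl (i - 1) (j - 1) r2.2
        (min (r1.1 + 1) (min (r2.1 + 1)
          (r3.1 + if xl.getD (i - 1) ' ' ≠ yl.getD (j - 1) ' ' then 1 else 0)), r3.2)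
    (p.1, p.2.insert (i, j) p.1)
  termination_by (i, j)
  decreasing_by
  · apply Prod.Lex.right; omega
  · apply Prod.Lex.left; omega
  · apply Prod.Lex.left; omega

def editDistance_pt_alt (x : String) (y : String) : Int :=
  let xl := x.toList
  let yl := y.toList
  let m := xl.length
  -- min(d(m, j) for j in range(len(y)+1)), the shared memo threaded through the generator
  let res := (List.range (yl.length + 1)).foldl
      (fun (s : List Int × PySem.Dict (Nat × Nat) Int) j =>
        let r := pvBD xl yl m j s.2
        (s.1 ++ [r.1], r.2)) ([], PySem.Dict.empty)
  (PySem.List.min? res.1 (fun v => v)).getD 0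

-- ===== PRECONDITION & SPEC =====
def Spec_editDistance_pt (x : String) (y : String) (out : Int) : Prop := out = editDistance_pt_alt x y
instance (x : String) (y : String) (out : Int) : Decidable (Spec_editDistance_pt x y out) := by unfold Spec_editDistance_pt; infer_instance

-- ===== CLAIM (what is proved, stated in full; the proofs are below) =====
def Claim_equal_editDistance_pt : Prop := ∀ (x : String) (y : String), Dom_editDistance_pt x y → Spec_editDistance_pt x y (editDistance_pt x y)

-- ===== LEMMAS AND PROOFS =====

-- The common recurrence: pvD xl yl i j = D[i][j] of A's matrix.
def pvD (xl yl : List Char) : Nat → Nat → Int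
  | 0, _ => 0
  | (i+1), 0 => (i : Int) + 1
  | (i+1), (j+1) =>
      min (pvD xl yl (i+1) j + 1)
        (min (pvD xl yl i (j+1) + 1)
          (if xl.getD i ' ' = yl.getD j ' ' then pvD xl yl i j else pvD xl yl i j + 1))
  termination_by i j => (i, j)

def pvRow (xl yl : List Char) (i : Nat) : List Int :=
  (List.range (yl.length + 1)).map (pvD xl yl i)

def pvInitRow (yl : List Char) (q : Nat) : List Int :=
  (q : Int) :: List.replicate yl.length (0 : Int)

def pvPartial (xl yl : List Char) (i j : Nat) : List Int :=
  (List.range (j + 1)).map (pvD xl yl i) ++ List.replicate (yl.length - j) (0 : Int)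

lemma pvD_zero_right (xl yl : List Char) (i : Nat) : pvD xl yl i 0 = (i : Int) := by
  cases i <;> simp [pvD]

lemma pvD_zero_left (xl yl : List Char) (j : Nat) : pvD xl yl 0 j = 0 := by
  cases j <;> simp [pvD]

lemma pv_append_fold (r : List Int) (k : Nat) (init : List (List Int)) :
    (List.range k).foldl (fun D _ => D ++ [r]) init = init ++ List.replicate k r := by
  induction k with
  | zero => simp
  | succ k ih =>
    rw [List.range_succ, List.foldl_append, ih]
    simp [List.replicate_succ']

lemma pv_init_fold (yl : List Char) (k K : Nat) (hk : k ≤ K) :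
    (List.range k).foldl (fun D i => D.set i ((D.getD i []).set 0 (i : Int)))
        (List.replicate K (List.replicate (yl.length + 1) (0 : Int)))
      = (List.range k).map (pvInitRow yl) ++
        List.replicate (K - k) (List.replicate (yl.length + 1) (0 : Int)) := by
  induction k with
  | zero => simp
  | succ k ih =>
    rw [List.range_succ, List.foldl_append, ih (by omega)]
    have hlen : ((List.range k).map (pvInitRow yl)).length = k := by simp
    have hrep : K - k = (K - (k+1)) + 1 := by omega
    rw [hrep, List.replicate_succ]
    simp only [List.foldl_cons, List.foldl_nil]
    rw [List.getD_append_right _ _ _ _ (by omega), List.set_append_right _ _ (by omega)]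
    simp [hlen, List.replicate_succ, pvInitRow, List.map_append]

lemma pv_partial_zero (xl yl : List Char) (i : Nat) :
    pvPartial xl yl i 0 = pvInitRow yl i := by
  simp [pvPartial, pvInitRow, pvD_zero_right]

lemma pv_partial_full (xl yl : List Char) (i : Nat) :
    pvPartial xl yl i yl.length = pvRow xl yl i := by
  simp [pvPartial, pvRow]

lemma pvRow_zero (xl yl : List Char) : pvRow xl yl 0 = pvInitRow yl 0 := by
  unfold pvRow pvInitRow
  apply List.ext_getElem (by simp)
  intro k h1 h2
  simp only [List.getElem_map, List.getElem_range, pvD_zero_left]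
  cases k with
  | zero => simp
  | succ k => simp [List.getElem_replicate]

lemma pv_getD_map_range {f : Nat → List Int} {k n : Nat} (h : n < k) :
    (((List.range k).map f).getD n []) = f n := by
  rw [List.getD_eq_getElem?_getD]
  simp [h]

lemma pv_getD_map_range' {f : Nat → Int} {k n : Nat} (h : n < k) :
    (((List.range k).map f).getD n 0) = f n := by
  rw [List.getD_eq_getElem?_getD]
  simp [h]

lemma pv_inner_step (xl yl : List Char) (i : Nat) (hi1 : 1 ≤ i) (him : i ≤ xl.length)
    (jc : Nat) (hj : jc < yl.length) :
    pvAInner xl yl i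
        ((List.range i).map (pvRow xl yl) ++ [pvPartial xl yl i jc] ++
          (List.range' (i+1) (xl.length - i)).map (pvInitRow yl)) (1 + jc)
      = (List.range i).map (pvRow xl yl) ++ [pvPartial xl yl i (jc + 1)] ++
          (List.range' (i+1) (xl.length - i)).map (pvInitRow yl) := by
  have hpre : ((List.range i).map (pvRow xl yl)).length = i := by simp
  simp only [pvAInner, List.append_assoc]
  have hrow : (((List.range i).map (pvRow xl yl) ++ ([pvPartial xl yl i jc] ++
      (List.range' (i+1) (xl.length - i)).map (pvInitRow yl))).getD i []) = pvPartial xl yl i jc := by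
    rw [List.getD_append_right _ _ _ _ (by omega)]
    simp [hpre]
  have hprow : (((List.range i).map (pvRow xl yl) ++ ([pvPartial xl yl i jc] ++
      (List.range' (i+1) (xl.length - i)).map (pvInitRow yl))).getD (i-1) []) = pvRow xl yl (i-1) := by
    rw [List.getD_append _ _ _ _ (by omega)]
    exact pv_getD_map_range (by omega)
  rw [hrow, hprow]
  have h1 : 1 + jc - 1 = jc := by omega
  rw [h1]
  have hrd : (pvPartial xl yl i jc).getD jc 0 = pvD xl yl i jc := by
    unfold pvPartial
    rw [List.getD_append _ _ _ _ (by simp)]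
    exact pv_getD_map_range' (by omega)
  have hpv : (pvRow xl yl (i-1)).getD (1 + jc) 0 = pvD xl yl (i-1) (1 + jc) := by
    unfold pvRow; exact pv_getD_map_range' (by omega)
  have hpd : (pvRow xl yl (i-1)).getD jc 0 = pvD xl yl (i-1) jc := by
    unfold pvRow; exact pv_getD_map_range' (by omega)
  rw [hrd, hpv, hpd]
  have hv : min ((pvD xl yl i jc) + 1)
      (min ((pvD xl yl (i-1) (1 + jc)) + 1)
        (if xl.getD (i-1) ' ' = yl.getD jc ' ' then pvD xl yl (i-1) jc else pvD xl yl (i-1) jc + 1))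
      = pvD xl yl i (jc + 1) := by
    obtain ⟨i', rfl⟩ : ∃ i', i = i' + 1 := ⟨i - 1, by omega⟩
    have : 1 + jc = jc + 1 := by omega
    simp only [Nat.add_sub_cancel, this]
    rw [pvD]
  rw [hv]
  have hset : (pvPartial xl yl i jc).set (1 + jc) (pvD xl yl i (jc + 1)) = pvPartial xl yl i (jc + 1) := by
    unfold pvPartial
    rw [List.set_append_right _ _ (by simp only [List.length_map, List.length_range]; omega)]
    have : yl.length - jc = (yl.length - (jc + 1)) + 1 := by omega
    rw [this, List.replicate_succ]
    have h2 : 1 + jc - ((List.range (jc+1)).map (pvD xl yl i)).length = 0 := by simp only [List.length_map, List.length_range]; omega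
    rw [h2]
    simp [List.range_succ, List.map_append]
  rw [hset, List.set_append_right _ _ (by omega)]
  simp [hpre]

lemma pv_inner_fold (xl yl : List Char) (i : Nat) (hi1 : 1 ≤ i) (him : i ≤ xl.length)
    (jc : Nat) (hjc : jc ≤ yl.length) :
    (List.range' 1 jc).foldl (pvAInner xl yl i)
        ((List.range i).map (pvRow xl yl) ++ [pvPartial xl yl i 0] ++
          (List.range' (i+1) (xl.length - i)).map (pvInitRow yl))
      = (List.range i).map (pvRow xl yl) ++ [pvPartial xl yl i jc] ++
          (List.range' (i+1) (xl.length - i)).map (pvInitRow yl) := by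
  induction jc with
  | zero => simp
  | succ jc ih =>
    rw [List.range'_1_concat, List.foldl_append, ih (by omega)]
    simp only [List.foldl_cons, List.foldl_nil]
    exact pv_inner_step xl yl i hi1 him jc (by omega)

lemma pv_outer_fold (xl yl : List Char) (ic : Nat) (hic : ic ≤ xl.length) :
    (List.range' 1 ic).foldl (pvAOuter xl yl)
        ((List.range (xl.length + 1)).map (pvInitRow yl))
      = (List.range (ic + 1)).map (pvRow xl yl) ++
        (List.range' (ic + 1) (xl.length - ic)).map (pvInitRow yl) := by
  induction ic with
  | zero =>
    have : List.range (xl.length + 1) = 0 :: List.range' 1 xl.length := by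
      rw [List.range_eq_range', List.range'_succ]
    simp [this, pvRow_zero]
  | succ ic ih =>
    rw [List.range'_1_concat, List.foldl_append, ih (by omega)]
    simp only [List.foldl_cons, List.foldl_nil]
    have hidx : 1 + ic = ic + 1 := by omega
    rw [hidx]
    have hsplit : (List.range' (ic + 1) (xl.length - ic)).map (pvInitRow yl)
        = pvPartial xl yl (ic + 1) 0 ::
          (List.range' (ic + 2) (xl.length - (ic + 1))).map (pvInitRow yl) := by
      have h1 : xl.length - ic = (xl.length - (ic + 1)) + 1 := by omega
      rw [h1, List.range'_succ, List.map_cons, pv_partial_zero]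
    rw [hsplit]
    have hinner := pv_inner_fold xl yl (ic + 1) (by omega) (by omega) yl.length (le_refl _)
    have hshape : (List.range (ic + 1)).map (pvRow xl yl) ++
          (pvPartial xl yl (ic + 1) 0 :: (List.range' (ic + 2) (xl.length - (ic + 1))).map (pvInitRow yl))
        = (List.range (ic + 1)).map (pvRow xl yl) ++ [pvPartial xl yl (ic + 1) 0] ++
          (List.range' ((ic + 1) + 1) (xl.length - (ic + 1))).map (pvInitRow yl) := by
      rw [List.append_assoc, List.singleton_append]
    rw [pvAOuter, hshape, hinner, pv_partial_full]
    have hmerge : (List.range (ic + 1)).map (pvRow xl yl) ++ [pvRow xl yl (ic + 1)]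
        = (List.range (ic + 1 + 1)).map (pvRow xl yl) := by
      conv_rhs => rw [List.range_succ]
      rw [List.map_append, List.map_singleton]
    rw [hmerge]

lemma pv_A_eq (x y : String) :
    editDistance_pt x y
      = ((List.range' 1 y.toList.length).map (pvD x.toList y.toList x.toList.length)).foldl
          min (pvD x.toList y.toList x.toList.length 0) := by
  simp only [editDistance_pt]
  rw [pv_append_fold, List.nil_append,
    pv_init_fold y.toList (x.toList.length + 1) (x.toList.length + 1) (le_refl _)]
  simp only [Nat.sub_self, List.replicate_zero, List.append_nil]
  rw [pv_outer_fold x.toList y.toList x.toList.length (le_refl _)]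
  simp only [Nat.sub_self, List.range'_zero, List.map_nil, List.append_nil]
  rw [List.range_succ, List.map_append, List.map_singleton,
    PySem.List.pyGet?_neg_one_append_singleton]
  have hrow : pvRow x.toList y.toList x.toList.length
      = pvD x.toList y.toList x.toList.length 0 ::
        (List.range' 1 y.toList.length).map (pvD x.toList y.toList x.toList.length) := by
    unfold pvRow
    rw [List.range_eq_range', List.range'_succ, List.map_cons]
  rw [Option.getD_some, hrow, PySem.List.min?_id_cons, Option.getD_some]

-- B-side: memo invariant and correctness of the memoized recursion.
def pvGood (xl yl : List Char) (memo : PySem.Dict (Nat × Nat) Int) : Prop :=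
  ∀ p v, memo.get? p = some v → v = pvD xl yl p.1 p.2

lemma pvGood_empty (xl yl : List Char) : pvGood xl yl PySem.Dict.empty := by
  intro p v h
  simp [PySem.Dict.get?_empty] at h

lemma pvGood_insert (xl yl : List Char) (memo : PySem.Dict (Nat × Nat) Int)
    (h : pvGood xl yl memo) (i j : Nat) :
    pvGood xl yl (memo.insert (i, j) (pvD xl yl i j)) := by
  intro p v hp
  rw [PySem.Dict.get?_insert] at hp
  split_ifs at hp with he
  · cases hp; rw [he]
  · exact h p v hp

lemma pvBD_spec (xl yl : List Char) :
    ∀ i j memo, pvGood xl yl memo →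
      (pvBD xl yl i j memo).1 = pvD xl yl i j ∧ pvGood xl yl (pvBD xl yl i j memo).2 := by
  intro i
  induction i with
  | zero =>
    intro j memo hg
    rw [pvBD]
    cases hv : memo.get? (0, j) with
    | some v =>
      simpa [hv, pvD_zero_left] using And.intro (hg (0, j) v hv) hg
    | none =>
      simp only [pvD_zero_left]
      refine ⟨rfl, ?_⟩
      have := pvGood_insert xl yl memo hg 0 j
      simpa [pvD_zero_left] using this
  | succ i ihi =>
    intro j
    induction j with
    | zero =>
      intro memo hg
      rw [pvBD]
      cases hv : memo.get? (i + 1, 0) with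
      | some v =>
        simpa [hv, pvD_zero_right] using And.intro (hg (i + 1, 0) v hv) hg
      | none =>
        refine ⟨by simp [pvD_zero_right], ?_⟩
        have := pvGood_insert xl yl memo hg (i + 1) 0
        simpa [pvD_zero_right] using this
    | succ j ihj =>
      intro memo hg
      rw [pvBD]
      cases hv : memo.get? (i + 1, j + 1) with
      | some v =>
        simpa using And.intro (hg (i + 1, j + 1) v hv) hg
      | none =>
        obtain ⟨e1, g1⟩ := ihj memo hg
        obtain ⟨e2, g2⟩ := ihi (j + 1) (pvBD xl yl (i + 1) j memo).2 g1
        obtain ⟨e3, g3⟩ := ihi j (pvBD xl yl i (j + 1) (pvBD xl yl (i + 1) j memo).2).2 g2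
        simp only [Nat.succ_ne_zero, dite_false, Nat.add_sub_cancel, e1, e2, e3]
        have hdiag : pvD xl yl i j + (if xl.getD i ' ' ≠ yl.getD j ' ' then (1 : Int) else 0)
            = if xl.getD i ' ' = yl.getD j ' ' then pvD xl yl i j else pvD xl yl i j + 1 := by
          split_ifs <;> simp_all
        have hval : min (pvD xl yl (i + 1) j + 1)
            (min (pvD xl yl i (j + 1) + 1)
              (pvD xl yl i j + if xl.getD i ' ' ≠ yl.getD j ' ' then 1 else 0))
            = pvD xl yl (i + 1) (j + 1) := by
          rw [hdiag, pvD]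
        rw [hval]
        exact ⟨rfl, pvGood_insert xl yl _ g3 (i + 1) (j + 1)⟩

lemma pv_B_fold (xl yl : List Char) (k : Nat) (acc : List Int)
    (memo : PySem.Dict (Nat × Nat) Int) (hg : pvGood xl yl memo) :
    ((List.range k).foldl
        (fun (s : List Int × PySem.Dict (Nat × Nat) Int) j =>
          let r := pvBD xl yl xl.length j s.2
          (s.1 ++ [r.1], r.2)) (acc, memo)).1
        = acc ++ (List.range k).map (pvD xl yl xl.length)
      ∧ pvGood xl yl ((List.range k).foldl
        (fun (s : List Int × PySem.Dict (Nat × Nat) Int) j =>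
          let r := pvBD xl yl xl.length j s.2
          (s.1 ++ [r.1], r.2)) (acc, memo)).2 := by
  induction k with
  | zero => simpa using hg
  | succ k ih =>
    obtain ⟨h1, h2⟩ := ih
    rw [List.range_succ, List.foldl_append]
    simp only [List.foldl_cons, List.foldl_nil]
    obtain ⟨e, g⟩ := pvBD_spec xl yl xl.length k _ h2
    refine ⟨?_, g⟩
    rw [h1, e]
    simp [List.map_append]

lemma pv_B_eq (x y : String) :
    editDistance_pt_alt x y
      = ((List.range' 1 y.toList.length).map (pvD x.toList y.toList x.toList.length)).foldl
          min (pvD x.toList y.toList x.toList.length 0) := by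
  simp only [editDistance_pt_alt]
  rw [(pv_B_fold x.toList y.toList (y.toList.length + 1) [] PySem.Dict.empty
      (pvGood_empty x.toList y.toList)).1, List.nil_append]
  have hrow : (List.range (y.toList.length + 1)).map (pvD x.toList y.toList x.toList.length)
      = pvD x.toList y.toList x.toList.length 0 ::
        (List.range' 1 y.toList.length).map (pvD x.toList y.toList x.toList.length) := by
    rw [List.range_eq_range', List.range'_succ, List.map_cons]
  rw [hrow, PySem.List.min?_id_cons, Option.getD_some]

-- ===== VERDICT (by name: the statement is the Claim_ definition above) =====
theorem editDistance_pt_spec : Claim_equal_editDistance_pt := by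
  intro x y _
  unfold Spec_editDistance_pt
  rw [pv_A_eq, pv_B_eq]
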